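-- pv_equiv track=rewrite | github.com/Chitrank-Dixit/coding-questions | dcp/recursion/binary_numbers.py | binaryNumbers
-- ===== SOURCE A (Python) =====
-- def binaryNumbers(n):
--   if n == 0:
--     return ['']
--   else:
--     fromNext = binaryNumbers(n-1)
--     output = []
--     for bin in fromNext:
--       if bin.count('0') < 2:
--         output.append('0'+bin)
--     for bin in fromNext:
--       output.append('1'+bin)
--     return output
-- ===== SOURCE B (Python) =====
-- def binaryNumbers(n):
--   out = []
--   for i in range(n):
--     for j in range(i + 1, n):
--       out.append('1' * i + '0' + '1' * (j - i - 1) + '0' + '1' * (n - j - 1))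
--     out.append('1' * i + '0' + '1' * (n - i - 1))
--   out.append('1' * n)
--   return out
-- ===== Notes on version B (the rewrite author's own statement) =====
-- stated objective: faster
-- what changed: Replaces the recursion that rebuilds and re-filters every shorter prefix level (counting zeros in each string at each level) by a direct combinatorial enumeration that emits each final-length string once, in the same order: for each first-zero position i, all two-zero strings (second zero at j), then the one-zero string, and finally the all-ones string.
import Mathlib
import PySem

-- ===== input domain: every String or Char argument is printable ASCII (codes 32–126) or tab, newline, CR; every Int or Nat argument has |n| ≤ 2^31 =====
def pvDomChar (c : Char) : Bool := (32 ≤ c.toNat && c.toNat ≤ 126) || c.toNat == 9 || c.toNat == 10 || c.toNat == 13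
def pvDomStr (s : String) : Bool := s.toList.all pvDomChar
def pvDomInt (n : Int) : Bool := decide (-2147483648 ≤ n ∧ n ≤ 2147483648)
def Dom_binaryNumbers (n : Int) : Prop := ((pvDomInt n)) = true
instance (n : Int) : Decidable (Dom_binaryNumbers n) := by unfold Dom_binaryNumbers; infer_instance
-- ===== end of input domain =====

-- B replaces A's recursion (which rebuilds and zero-count-filters every shorter level) by a
-- direct enumeration emitting each final-length string once, in the same order: asymptotically faster.

-- ===== PORT A =====
-- Literal port of A.  For negative n the Python recursion never reaches the base case
-- (RecursionError); the negative branch is only a totality guard, excluded by Pre_.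
def binaryNumbers (n : Int) : List String :=
  if n = 0 then [""]
  else if n < 0 then []
  else
    let fromNext := binaryNumbers (n - 1)
    let output : List String := []
    let output := fromNext.foldl
      (fun output bin => if PySem.Str.count bin "0" < 2 then output ++ ["0" ++ bin] else output) output
    let output := fromNext.foldl (fun output bin => output ++ ["1" ++ bin]) output
    output
termination_by n.toNat
decreasing_by omega

-- ===== PORT B =====
-- '1' * k  (Python string repetition; empty for k ≤ 0, exactly as in Python)
def pvRep1 (k : Int) : String := String.ofList (List.replicate k.toNat '1')

def binaryNumbers_alt (n : Int) : List String :=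
  let out : List String := []
  let out := (PySem.List.pyRange 0 n 1).foldl (fun out i =>
    let out := (PySem.List.pyRange (i + 1) n 1).foldl (fun out j =>
      out ++ [pvRep1 i ++ "0" ++ pvRep1 (j - i - 1) ++ "0" ++ pvRep1 (n - j - 1)]) out
    out ++ [pvRep1 i ++ "0" ++ pvRep1 (n - i - 1)]) out
  out ++ [pvRep1 n]

-- ===== PRECONDITION & SPEC =====
-- A recurses on n-1 with no base case for negative n, where the Python raises RecursionError.
def Pre_binaryNumbers (n : Int) : Prop := 0 ≤ n
instance (n : Int) : Decidable (Pre_binaryNumbers n) := by unfold Pre_binaryNumbers; infer_instance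
def pvWitness_binaryNumbers : Int := 3

def Spec_binaryNumbers (n : Int) (out : List String) : Prop := out = binaryNumbers_alt n
instance (n : Int) (out : List String) : Decidable (Spec_binaryNumbers n out) := by unfold Spec_binaryNumbers; infer_instance

-- ===== CLAIM (what is proved, stated in full; the proofs are below) =====
def Claim_equal_binaryNumbers : Prop := ∀ (n : Int), Dom_binaryNumbers n → Pre_binaryNumbers n → Spec_binaryNumbers n (binaryNumbers n)

-- ===== LEMMAS AND PROOFS =====

-- Closed forms used only by the proofs: the all-ones string, the one-zero string (zero at i),
-- the two-zero string (zeros at i < j), the ascending one-zero list, and B's whole output.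
def pvOnes (m : Nat) : String := String.ofList (List.replicate m '1')
def pvOZ (m i : Nat) : String := pvOnes i ++ "0" ++ pvOnes (m - 1 - i)
def pvTZ (m i j : Nat) : String := pvOnes i ++ "0" ++ pvOnes (j - i - 1) ++ "0" ++ pvOnes (m - 1 - j)
def pvOZL (m : Nat) : List String := (List.range m).map (pvOZ m)
def pvBspec (m : Nat) : List String :=
  (List.range m).flatMap (fun i => (List.range' (i + 1) (m - 1 - i)).map (pvTZ m i) ++ [pvOZ m i])
    ++ [pvOnes m]

def pvCnt (s : String) : Nat := s.toList.count '0'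

-- ---- the Python str.count bridge for the single character "0" ----
lemma pv_count_go_single (c : Char) : ∀ (fuel : Nat) (l : List Char) (acc : Nat),
    l.length ≤ fuel → PySem.Chars.count.go [c] fuel l acc = acc + l.count c := by
  intro fuel
  induction fuel with
  | zero =>
    intro l acc h
    have : l = [] := List.eq_nil_of_length_eq_zero (Nat.le_zero.mp h)
    subst this
    simp [PySem.Chars.count.go]
  | succ f ih =>
    intro l acc h
    cases l with
    | nil => simp [PySem.Chars.count.go]
    | cons hd t =>
      simp only [PySem.Chars.count.go, List.isPrefixOf, List.length_cons] at *
      by_cases hc : c = hd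
      · subst hc
        simp only [beq_self_eq_true, Bool.true_and, if_pos, List.length_nil, Nat.zero_add,
          List.drop_one, List.tail_cons]
        rw [ih t (acc + 1) (by omega)]
        simp [List.count_cons]
        omega
      · have hb : (c == hd) = false := by simp [hc]
        simp only [hb, Bool.false_and, Bool.false_eq_true, if_neg, not_false_iff]
        rw [ih t acc (by omega)]
        simp [List.count_cons, Ne.symm hc]

lemma pv_str_count_zero (s : String) : PySem.Str.count s "0" = pvCnt s := by
  rw [PySem.Str.count_eq, show ("0" : String).toList = ['0'] from rfl]
  unfold PySem.Chars.count
  simp only [List.isEmpty_cons, Bool.false_eq_true, if_neg, not_false_iff]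
  rw [pv_count_go_single '0' s.toList.length s.toList 0 (le_refl _)]
  simp [pvCnt]

-- ---- pvCnt arithmetic ----
lemma pvCnt_zero_cons (s : String) : pvCnt ("0" ++ s) = pvCnt s + 1 := by
  simp [pvCnt, show ("0" : String).toList = ['0'] from rfl]

lemma pvCnt_one_cons (s : String) : pvCnt ("1" ++ s) = pvCnt s := by
  simp [pvCnt, show ("1" : String).toList = ['1'] from rfl, List.count_cons]

lemma pvCnt_ones (m : Nat) : pvCnt (pvOnes m) = 0 := by
  simp [pvCnt, pvOnes, List.count_replicate]

lemma pvCnt_oz (m i : Nat) : pvCnt (pvOZ m i) = 1 := by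
  simp [pvOZ, pvCnt, show ("0" : String).toList = ['0'] from rfl, pvOnes,
    List.count_replicate, List.count_cons]

-- ---- string building-block identities ----
lemma pvOnes_succ (m : Nat) : pvOnes (m + 1) = "1" ++ pvOnes m := by
  apply String.toList_inj.mp
  simp [pvOnes, List.replicate_succ]

lemma pvOZ_zero (m : Nat) : pvOZ (m + 1) 0 = "0" ++ pvOnes m := by
  apply String.toList_inj.mp
  simp [pvOZ, pvOnes]

lemma pvOZ_succ (m i : Nat) : pvOZ (m + 1) (i + 1) = "1" ++ pvOZ m i := by
  apply String.toList_inj.mp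
  simp [pvOZ, pvOnes, List.replicate_succ]
  omega

lemma pvTZ_zero (m j : Nat) : pvTZ (m + 1) 0 (j + 1) = "0" ++ pvOZ m j := by
  apply String.toList_inj.mp
  simp [pvTZ, pvOZ, pvOnes]
  omega

lemma pvTZ_succ (m i j : Nat) : pvTZ (m + 1) (i + 1) (j + 1) = "1" ++ pvTZ m i j := by
  apply String.toList_inj.mp
  have h2 : j + 1 - (i + 1) - 1 = j - i - 1 := by omega
  simp [pvTZ, pvOnes, h2, List.replicate_succ]
  omega

lemma pvOZL_succ (m : Nat) :
    pvOZL (m + 1) = ("0" ++ pvOnes m) :: (pvOZL m).map (fun s => "1" ++ s) := by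
  simp [pvOZL, List.range_succ_eq_map, pvOZ_zero, pvOZ_succ, Function.comp]

-- ---- B's closed-form recurrence ----
lemma pvBspec_zero : pvBspec 0 = [""] := by
  simp [pvBspec, pvOnes]

lemma pvBspec_succ (m : Nat) :
    pvBspec (m + 1) = (pvOZL m ++ [pvOnes m]).map (fun s => "0" ++ s)
      ++ (pvBspec m).map (fun s => "1" ++ s) := by
  unfold pvBspec
  rw [List.range_succ_eq_map]
  rw [List.flatMap_cons, List.flatMap_map]
  have hblock0 : (List.range' (0 + 1) (m + 1 - 1 - 0)).map (pvTZ (m + 1) 0) ++ [pvOZ (m + 1) 0]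
      = (pvOZL m ++ [pvOnes m]).map (fun s => "0" ++ s) := by
    have hr : List.range' (0 + 1) (m + 1 - 1 - 0) = (List.range m).map (fun k => k + 1) := by
      rw [List.range'_eq_map_range]
      simp [Nat.add_comm]
    rw [hr, List.map_map, pvOZ_zero]
    simp only [pvOZL, List.map_append, List.map_map]
    congr 1
    apply List.map_congr_left
    intro k _
    simp [Function.comp, pvTZ_zero]
  have hblocks : (List.range m).flatMap
        (fun a => (List.range' (a.succ + 1) (m + 1 - 1 - a.succ)).map (pvTZ (m + 1) a.succ)
          ++ [pvOZ (m + 1) a.succ])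
      = ((List.range m).flatMap
          (fun i => (List.range' (i + 1) (m - 1 - i)).map (pvTZ m i) ++ [pvOZ m i])).map
            (fun s => "1" ++ s) := by
    rw [List.map_flatMap]
    apply List.flatMap_congr
    intro i _
    simp only [Nat.succ_eq_add_one, Function.comp, List.map_append, List.map_map]
    have hr : List.range' (i + 1 + 1) (m + 1 - 1 - (i + 1)) = (List.range' (i + 1) (m - 1 - i)).map (fun k => k + 1) := by
      rw [List.range'_eq_map_range, List.range'_eq_map_range]
      have : m + 1 - 1 - (i + 1) = m - 1 - i := by omega
      rw [this, List.map_map]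
      apply List.map_congr_left
      intro k _
      simp [Function.comp]
      omega
    rw [hr, List.map_map, pvOZ_succ]
    congr 1
    apply List.map_congr_left
    intro k _
    simp [Function.comp, pvTZ_succ]
  rw [hblock0, hblocks, pvOnes_succ]
  simp

-- ---- filters of B's closed form ----
lemma pv_filter_ozl_le_zero (m : Nat) :
    (pvOZL m ++ [pvOnes m]).filter (fun s => decide (pvCnt s ≤ 0)) = [pvOnes m] := by
  rw [List.filter_append]
  have h1 : (pvOZL m).filter (fun s => decide (pvCnt s ≤ 0)) = [] := by
    rw [List.filter_eq_nil_iff]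
    intro s hs
    obtain ⟨i, _, rfl⟩ := List.mem_map.mp hs
    simp [pvCnt_oz]
  rw [h1]
  simp [pvCnt_ones]

lemma pv_filters (m : Nat) :
    (pvBspec m).filter (fun s => decide (pvCnt s ≤ 1)) = pvOZL m ++ [pvOnes m]
    ∧ (pvBspec m).filter (fun s => decide (pvCnt s ≤ 0)) = [pvOnes m] := by
  induction m with
  | zero =>
    constructor <;> simp [pvBspec_zero, pvOZL, pvCnt, pvOnes]
  | succ m ih =>
    have hz : (fun s => decide (pvCnt ("0" ++ s) ≤ 1)) = (fun s => decide (pvCnt s ≤ 0)) := by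
      funext s
      rw [pvCnt_zero_cons]
      simp only [decide_eq_decide]
      omega
    have hz0 : (fun s => decide (pvCnt ("0" ++ s) ≤ 0)) = (fun s => (false : Bool)) := by
      funext s
      simp [pvCnt_zero_cons]
    have ho1 : (fun s => decide (pvCnt ("1" ++ s) ≤ 1)) = (fun s => decide (pvCnt s ≤ 1)) := by
      funext s
      simp [pvCnt_one_cons]
    have ho0 : (fun s => decide (pvCnt ("1" ++ s) ≤ 0)) = (fun s => decide (pvCnt s ≤ 0)) := by
      funext s
      simp [pvCnt_one_cons]
    constructor
    · rw [pvBspec_succ, List.filter_append, List.filter_map, List.filter_map]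
      simp only [Function.comp_def]
      rw [show (fun s => decide (pvCnt ("0" ++ s) ≤ 1)) = (fun s => decide (pvCnt s ≤ 0)) from hz,
        show (fun s => decide (pvCnt ("1" ++ s) ≤ 1)) = (fun s => decide (pvCnt s ≤ 1)) from ho1,
        pv_filter_ozl_le_zero, ih.1, pvOZL_succ, pvOnes_succ]
      simp
    · rw [pvBspec_succ, List.filter_append, List.filter_map, List.filter_map]
      simp only [Function.comp_def]
      rw [show (fun s => decide (pvCnt ("0" ++ s) ≤ 0)) = (fun s => (false : Bool)) from hz0,
        show (fun s => decide (pvCnt ("1" ++ s) ≤ 0)) = (fun s => decide (pvCnt s ≤ 0)) from ho0,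
        ih.2, pvOnes_succ]
      simp

-- ---- A's one-step recurrence ----
lemma pvA_succ (m : Nat) :
    binaryNumbers ((m : Int) + 1)
      = ((binaryNumbers (m : Int)).filter (fun b => decide (pvCnt b ≤ 1))).map (fun b => "0" ++ b)
        ++ (binaryNumbers (m : Int)).map (fun b => "1" ++ b) := by
  rw [binaryNumbers]
  have h0 : ¬ ((m : Int) + 1 = 0) := by omega
  have h1 : ¬ ((m : Int) + 1 < 0) := by omega
  rw [if_neg h0, if_neg h1]
  have hs : (m : Int) + 1 - 1 = (m : Int) := by ring
  rw [hs]
  dsimp only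
  rw [PySem.List.foldl_append_ite, PySem.List.foldl_append_singleton_eq_map]
  have hp : (fun bin => decide (PySem.Str.count bin "0" < 2))
      = (fun b => decide (pvCnt b ≤ 1)) := by
    funext b
    rw [pv_str_count_zero b]
    simp only [decide_eq_decide]
    omega
  rw [hp]
  simp

-- ---- A equals B's closed form ----
lemma pvA_eq_Bspec (m : Nat) : binaryNumbers (m : Int) = pvBspec m := by
  induction m with
  | zero =>
    rw [pvBspec_zero, show ((0 : Nat) : Int) = 0 from rfl, binaryNumbers]
    simp
  | succ m ih =>
    have hf := pv_filters m
    rw [show ((m + 1 : Nat) : Int) = (m : Int) + 1 by push_cast; ring, pvA_succ, ih, hf.1,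
      pvBspec_succ]

-- ---- B's port equals B's closed form ----
lemma pvRep1_natCast (e : Int) : pvRep1 e = pvOnes e.toNat := rfl

lemma pvAlt_eq_Bspec (m : Nat) : binaryNumbers_alt (m : Int) = pvBspec m := by
  unfold binaryNumbers_alt
  dsimp only
  simp only [PySem.List.pyRange_one, List.foldl_map, PySem.List.foldl_append_singleton_eq_map,
    List.append_assoc, PySem.List.foldl_append_eq_flatMap, List.nil_append, zero_add,
    Int.sub_zero, Int.toNat_natCast]
  unfold pvBspec
  congr 1
  apply List.flatMap_congr
  intro i _
  have hr : List.range' (i + 1) (m - 1 - i) = (List.range (m - 1 - i)).map (fun k => i + 1 + k) := by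
    rw [List.range'_eq_map_range]
  have hn : ((m : Int) - ((i : Int) + 1)).toNat = m - 1 - i := by omega
  rw [hr, List.map_map, hn]
  congr 1
  · apply List.map_congr_left
    intro k _
    have e1 : ((i : Int)).toNat = i := by omega
    have e2 : ((i : Int) + 1 + (k : Int) - (i : Int) - 1).toNat = i + 1 + k - i - 1 := by omega
    have e3 : ((m : Int) - ((i : Int) + 1 + (k : Int)) - 1).toNat = m - 1 - (i + 1 + k) := by
      omega
    simp only [Function.comp, pvRep1_natCast, e1, e2, e3, pvTZ]
  · have e1 : ((i : Int)).toNat = i := by omega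
    have e4 : ((m : Int) - (i : Int) - 1).toNat = m - 1 - i := by omega
    simp only [pvRep1_natCast, e1, e4, pvOZ]

-- ===== VERDICT (by name: the statement is the Claim_ definition above) =====
theorem binaryNumbers_spec : Claim_equal_binaryNumbers := by
  intro n _ hpre
  unfold Spec_binaryNumbers
  obtain ⟨m, rfl⟩ := Int.eq_ofNat_of_zero_le hpre
  rw [pvA_eq_Bspec, pvAlt_eq_Bspec]
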